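-- pv_equiv track=rewrite | github.com/LukeChenyk/PythonUtil | GenAS/GenASFileHandler.py | checkLineCommentIndex
-- ===== SOURCE A (Python) =====
-- def checkLineCommentIndex(line: str):
--     codeEndIndex = -1
--     codeStartIndex = -1  # 有内容字符开始的地方
--     for s in line:
--         codeEndIndex = codeEndIndex + 1
--         if s != " " and s != "\t" and codeStartIndex == -1:
--             codeStartIndex = codeEndIndex
--
--         if s == '/':
--             return codeEndIndex, codeStartIndex
--         elif s == "*":
--             return codeEndIndex, codeStartIndex
--
--     return codeEndIndex, codeStartIndex
-- ===== SOURCE B (Python) =====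
-- def checkLineCommentIndex(line: str):
--     codeEndIndex = next((k for k, c in enumerate(line) if c in '/*'), len(line) - 1)
--     codeStartIndex = next((k for k, c in enumerate(line) if c not in ' \t'), -1)
--     return codeEndIndex, codeStartIndex
-- ===== Notes on version B (the rewrite author's own statement) =====
-- stated objective: simpler
-- what changed: Replaces A's single stateful early-return loop over two mutable indices by two independent first-index searches (first '/'-or-'*' index defaulting to len-1, first non-space/tab index defaulting to -1); correct because a comment char is itself non-whitespace.
import Mathlib
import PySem

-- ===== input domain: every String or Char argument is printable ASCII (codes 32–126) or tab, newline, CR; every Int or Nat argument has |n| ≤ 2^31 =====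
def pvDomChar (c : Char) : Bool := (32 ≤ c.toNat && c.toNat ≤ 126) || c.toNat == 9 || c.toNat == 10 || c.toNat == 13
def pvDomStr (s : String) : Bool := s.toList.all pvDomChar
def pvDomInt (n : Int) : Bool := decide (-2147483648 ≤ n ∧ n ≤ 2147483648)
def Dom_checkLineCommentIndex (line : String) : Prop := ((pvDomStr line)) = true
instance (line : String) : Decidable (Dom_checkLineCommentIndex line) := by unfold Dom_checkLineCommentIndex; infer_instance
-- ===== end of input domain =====

-- B: two independent first-index searches instead of A's single stateful early-return loop (simpler decomposition, same cost).
-- ===== PORT A =====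
-- the for-loop of A: state (codeEndIndex, codeStartIndex), early return on '/' or '*'
def pvGoA : List Char → Int → Int → Int × Int
  | [], e, s => (e, s)
  | c :: rest, e, s =>
    let e := e + 1
    let s := if c ≠ ' ' ∧ c ≠ '\t' ∧ s = -1 then e else s
    if c = '/' then (e, s)
    else if c = '*' then (e, s)
    else pvGoA rest e s

def checkLineCommentIndex (line : String) : Int × Int :=
  pvGoA line.toList (-1) (-1)

-- ===== PORT B =====
-- next((k for k, c in enumerate(line) if p c), default) = List.findIdx? with a default
def checkLineCommentIndex_alt (line : String) : Int × Int :=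
  let l := line.toList
  let codeEndIndex : Int :=
    match l.findIdx? (fun c => c == '/' || c == '*') with
    | some k => (k : Int)
    | none => (l.length : Int) - 1
  let codeStartIndex : Int :=
    match l.findIdx? (fun c => !(c == ' ') && !(c == '\t')) with
    | some k => (k : Int)
    | none => -1
  (codeEndIndex, codeStartIndex)

-- ===== PRECONDITION & SPEC =====
def Spec_checkLineCommentIndex (line : String) (out : Int × Int) : Prop := out = checkLineCommentIndex_alt line
instance (line : String) (out : Int × Int) : Decidable (Spec_checkLineCommentIndex line out) := by unfold Spec_checkLineCommentIndex; infer_instance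

-- ===== CLAIM (what is proved, stated in full; the proofs are below) =====
def Claim_equal_checkLineCommentIndex : Prop := ∀ (line : String), Dom_checkLineCommentIndex line → Spec_checkLineCommentIndex line (checkLineCommentIndex line)

-- ===== LEMMAS AND PROOFS =====

-- once codeStartIndex is set (s ≠ -1) it never changes; the end index is the shifted first comment-char index
theorem pvGoA_set (l : List Char) : ∀ (e s : Int), s ≠ -1 →
    pvGoA l e s =
      ((match l.findIdx? (fun c => c == '/' || c == '*') with
        | some k => e + 1 + (k : Int)
        | none => e + (l.length : Int)), s) := by
  induction l with
  | nil => intro e s _; simp [pvGoA]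
  | cons c rest ih =>
    intro e s hs
    have hcond : ¬(c ≠ ' ' ∧ c ≠ '\t' ∧ s = -1) := fun h => hs h.2.2
    by_cases hc : c = '/'
    · simp [pvGoA, hcond, hc, hs, List.findIdx?_cons]
    · by_cases hstar : c = '*'
      · simp [pvGoA, hcond, hstar, hc, hs, List.findIdx?_cons]
      · rw [show pvGoA (c :: rest) e s = pvGoA rest (e + 1) s from by
              simp [pvGoA, hcond, hc, hstar],
            ih (e + 1) s hs]
        have hb : (c == '/' || c == '*') = false := by simp [hc, hstar]
        cases h : rest.findIdx? (fun c => c == '/' || c == '*') <;>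
          simp [List.findIdx?_cons, hb, h, Prod.mk.injEq] <;> ring

-- main loop invariant: starting unset, pvGoA computes both shifted first-index searches
theorem pvGoA_main (l : List Char) : ∀ (e : Int), -1 ≤ e →
    pvGoA l e (-1) =
      ((match l.findIdx? (fun c => c == '/' || c == '*') with
        | some k => e + 1 + (k : Int)
        | none => e + (l.length : Int)),
       (match l.findIdx? (fun c => !(c == ' ') && !(c == '\t')) with
        | some k => e + 1 + (k : Int)
        | none => -1)) := by
  induction l with
  | nil => intro e _; simp [pvGoA]
  | cons c rest ih =>
    intro e he
    by_cases hws : c = ' ' ∨ c = '\t'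
    · -- whitespace char: not a comment char, the start index stays unset
      have hc : c ≠ '/' := by rcases hws with h | h <;> simp [h]
      have hstar : c ≠ '*' := by rcases hws with h | h <;> simp [h]
      have hb : (c == '/' || c == '*') = false := by simp [hc, hstar]
      have hif : ¬(¬c = ' ' ∧ ¬c = '\t') := by tauto
      rw [show pvGoA (c :: rest) e (-1) = pvGoA rest (e + 1) (-1) from by
            simp [pvGoA, hif, hc, hstar],
          ih (e + 1) (by omega)]
      cases h1 : rest.findIdx? (fun c => c == '/' || c == '*') <;>
        cases h2 : rest.findIdx? (fun c => !(c == ' ') && !(c == '\t')) <;>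
          simp [List.findIdx?_cons, hb, hif, h1, h2, Prod.mk.injEq] <;> try ring
      all_goals exact ⟨trivial, trivial⟩
    · -- non-whitespace char: the start index is set to e + 1 here
      push_neg at hws
      by_cases hc : c = '/'
      · simp [pvGoA, hws.1, hws.2, hc, List.findIdx?_cons]
      · by_cases hstar : c = '*'
        · simp [pvGoA, hws.1, hws.2, hstar, hc, List.findIdx?_cons]
        · have hb : (c == '/' || c == '*') = false := by simp [hc, hstar]
          rw [show pvGoA (c :: rest) e (-1) = pvGoA rest (e + 1) (e + 1) from by
                simp [pvGoA, hws.1, hws.2, hc, hstar],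
              pvGoA_set rest (e + 1) (e + 1) (by omega)]
          cases h1 : rest.findIdx? (fun c => c == '/' || c == '*') <;>
            simp [List.findIdx?_cons, hb, hws.1, hws.2, h1, Prod.mk.injEq] <;> ring

-- ===== VERDICT (by name: the statement is the Claim_ definition above) =====
theorem checkLineCommentIndex_spec : Claim_equal_checkLineCommentIndex := by
  intro line _
  unfold Spec_checkLineCommentIndex checkLineCommentIndex checkLineCommentIndex_alt
  rw [pvGoA_main line.toList (-1) (by omega)]
  cases h1 : line.toList.findIdx? (fun c => c == '/' || c == '*') <;>
    cases h2 : line.toList.findIdx? (fun c => !(c == ' ') && !(c == '\t')) <;>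
      simp [h1, h2, String.length_toList, Prod.mk.injEq] <;> ring
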